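-- pv_equiv track=rewrite | github.com/jirikopecky/Hangman | src/Hangman.py | _GetHiddenWord
-- ===== SOURCE A (Python) =====
-- def _GetHiddenWord(word):
--     hidden = ""
--
--     for i in range(0, len(word)):
--         if word[i] == " ":
--             hidden += " "
--         else:
--             hidden += "*"
--
--     return hidden
-- ===== SOURCE B (Python) =====
-- def _GetHiddenWord(word):
--     return " ".join("*" * len(segment) for segment in word.split(" "))
-- ===== Notes on version B (the rewrite author's own statement) =====
-- stated objective: idiomatic
-- what changed: Replaces the per-character index loop with branch-and-append by splitting on single spaces, mapping each segment to an asterisk run of its length, and joining with spaces.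
import Mathlib
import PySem

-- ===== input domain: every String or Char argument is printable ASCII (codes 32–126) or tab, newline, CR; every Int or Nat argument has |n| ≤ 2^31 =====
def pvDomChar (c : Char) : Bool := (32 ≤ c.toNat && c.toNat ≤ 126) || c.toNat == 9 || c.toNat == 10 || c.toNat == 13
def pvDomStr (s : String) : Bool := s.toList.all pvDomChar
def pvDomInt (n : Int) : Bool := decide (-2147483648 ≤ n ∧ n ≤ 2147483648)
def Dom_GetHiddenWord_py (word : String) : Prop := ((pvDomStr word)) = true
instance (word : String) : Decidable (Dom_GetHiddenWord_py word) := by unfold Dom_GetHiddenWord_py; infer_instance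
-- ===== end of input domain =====

-- B masks the word by splitting on single spaces, mapping each segment to a run of '*', and joining with spaces (idiomatic decomposition; same result).

-- ===== PORT A =====
-- per-character loop: append " " for a space, "*" otherwise
def GetHiddenWord_py (word : String) : String :=
  String.ofList (word.toList.foldl
    (fun hidden c => hidden ++ (if c == ' ' then [' '] else ['*'])) [])

-- ===== PORT B =====
-- " ".join("*" * len(segment) for segment in word.split(" "))
def GetHiddenWord_py_alt (word : String) : String :=
  String.ofList (PySem.Chars.join [' ']
    ((PySem.Chars.splitOn word.toList [' ']).map
      (fun segment => List.replicate segment.length '*')))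

-- ===== PRECONDITION & SPEC =====
def Spec_GetHiddenWord_py (word : String) (out : String) : Prop := out = GetHiddenWord_py_alt word
instance (word : String) (out : String) : Decidable (Spec_GetHiddenWord_py word out) := by unfold Spec_GetHiddenWord_py; infer_instance

-- ===== CLAIM (what is proved, stated in full; the proofs are below) =====
def Claim_equal_GetHiddenWord_py : Prop := ∀ (word : String), Dom_GetHiddenWord_py word → Spec_GetHiddenWord_py word (GetHiddenWord_py word)

-- ===== LEMMAS AND PROOFS =====

-- character-level mask
def pvMaskChar (c : Char) : Char := if c == ' ' then ' ' else '*'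

-- simple structural model of splitting on a single space
def pvSplit : List Char → List Char → List (List Char)
  | [], cur => [cur.reverse]
  | c :: rest, cur => if c == ' ' then cur.reverse :: pvSplit rest [] else pvSplit rest (c :: cur)

theorem pvSplit_ne_nil (l cur : List Char) : pvSplit l cur ≠ [] := by
  induction l generalizing cur with
  | nil => simp [pvSplit]
  | cons c rest ih => simp only [pvSplit]; split <;> simp [ih]

theorem pv_join_cons (sep x : List Char) (ys : List (List Char)) (h : ys ≠ []) :
    PySem.Chars.join sep (x :: ys) = x ++ sep ++ PySem.Chars.join sep ys := by
  cases ys with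
  | nil => exact absurd rfl h
  | cons y ys => exact PySem.Chars.join_cons_cons ..

theorem pv_go_eq (fuel : Nat) (l cur : List Char) (acc : List (List Char))
    (h : l.length ≤ fuel) :
    PySem.Chars.splitOn.go [' '] fuel l cur acc = acc.reverse ++ pvSplit l cur := by
  induction fuel generalizing l cur acc with
  | zero =>
      have : l = [] := List.length_eq_zero_iff.mp (Nat.le_zero.mp h)
      subst this
      simp [PySem.Chars.splitOn.go, pvSplit]
  | succ fuel ih =>
      cases l with
      | nil => simp [PySem.Chars.splitOn.go, pvSplit]
      | cons c rest =>
          simp only [PySem.Chars.splitOn.go, pvSplit]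
          by_cases hc : c = ' '
          · subst hc
            simp only [List.isPrefixOf, beq_self_eq_true, Bool.true_and, 
              if_true, List.length_singleton, List.drop_succ_cons, List.drop_zero]
            rw [ih rest [] (cur.reverse :: acc) (by simpa using Nat.le_of_succ_le_succ h)]
            simp
          · simp only [List.isPrefixOf,  Bool.and_true]
            rw [if_neg (by simp; exact fun h' => hc h'.symm)]
            rw [if_neg (by simp [hc])]
            exact ih rest (c :: cur) acc (by simpa using Nat.le_of_succ_le_succ h)

theorem pv_join_split (l cur : List Char) :
    PySem.Chars.join [' '] ((pvSplit l cur).map (fun s => List.replicate s.length '*')) =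
      List.replicate cur.length '*' ++ l.map pvMaskChar := by
  induction l generalizing cur with
  | nil => simp [pvSplit, PySem.Chars.join_singleton]
  | cons c rest ih =>
      simp only [pvSplit]
      by_cases hc : c = ' '
      · subst hc
        rw [if_pos (by simp)]
        rw [List.map_cons,
          pv_join_cons _ _ _ (by simp [pvSplit_ne_nil]),
          ih []]
        simp [pvMaskChar]
      · rw [if_neg (by simp [hc])]
        rw [ih (c :: cur)]
        simp [pvMaskChar, hc, List.replicate_succ', List.append_assoc]

theorem pv_foldl_mask (l acc : List Char) :
    l.foldl (fun hidden c => hidden ++ (if c == ' ' then [' '] else ['*'])) acc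
      = acc ++ l.map pvMaskChar := by
  induction l generalizing acc with
  | nil => simp
  | cons c rest ih =>
      simp only [List.foldl_cons, List.map_cons, ih]
      by_cases hc : c = ' ' <;> simp [pvMaskChar, hc]

-- ===== VERDICT (by name: the statement is the Claim_ definition above) =====
theorem GetHiddenWord_py_spec : Claim_equal_GetHiddenWord_py := by
  intro word _
  show _ = _
  unfold GetHiddenWord_py GetHiddenWord_py_alt PySem.Chars.splitOn
  rw [pv_go_eq _ _ _ _ (Nat.le_succ _), pv_foldl_mask]
  simp only [List.reverse_nil, List.nil_append, pv_join_split, List.length_nil,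
    List.replicate_zero]
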